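-- pv_equiv track=rewrite | github.com/GSandu1/Lab3AA | Lab6/main.py | calc_spigot
-- ===== SOURCE A (Python) =====
-- def calc_spigot(n):
--     pi_digits = [2]
--     # Iteratively compute each digit of PI
--     for i in range(1, n+1):
--         carry_over = 0
--         # Adjust each digit in place and carry over the remainder
--         for j in reversed(range(len(pi_digits))):
--             val = 10 * pi_digits[j] + carry_over
--             pi_digits[j] = val // (2*i - 1)
--             carry_over = val % (2*i - 1)
--         # Handle any remaining carry
--         while carry_over > 0:
--             pi_digits.insert(0, carry_over % 10)
--             carry_over //= 10
--     return pi_digits[-1]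
-- ===== SOURCE B (Python) =====
-- def calc_spigot(n):
--     # The returned value is pi_digits[-1]; in A the last array slot is always
--     # processed first (before any carry accumulates) and never touched again, so only it needs tracking.
--     x = 2
--     for i in range(1, n + 1):
--         x = (10 * x) // (2 * i - 1)
--     return x
-- ===== Notes on version B (the rewrite author's own statement) =====
-- stated objective: faster
-- what changed: B tracks only the last array slot (the returned one) as a single integer, since A's reversed in-place sweep always hits it first with an empty carry and the front insertions never move it; the whole digit array and carry propagation disappear.
import Mathlib
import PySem

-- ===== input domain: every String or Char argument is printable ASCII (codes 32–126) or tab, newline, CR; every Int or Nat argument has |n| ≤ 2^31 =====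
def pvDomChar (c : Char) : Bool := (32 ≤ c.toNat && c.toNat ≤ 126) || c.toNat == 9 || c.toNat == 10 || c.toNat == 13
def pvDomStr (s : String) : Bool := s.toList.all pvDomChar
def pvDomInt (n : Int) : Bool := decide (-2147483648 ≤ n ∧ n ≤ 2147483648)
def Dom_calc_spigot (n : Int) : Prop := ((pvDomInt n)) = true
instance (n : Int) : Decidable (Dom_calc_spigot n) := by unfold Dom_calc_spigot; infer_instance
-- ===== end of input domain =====

-- B replaces A's whole digit array (quadratic in-place sweeps) by the single returned
-- slot, which A always updates first (before any carry accumulates) and never moves: O(n) instead of O(n^2).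

-- ===== PORT A =====
-- one step of 'for j in reversed(range(len(pi_digits)))'; state = (pi_digits, carry_over).
-- j is always < len(pi_digits) here, so the getD default is never used.
def innerStep (d : Int) (s : List Int × Int) (j : Nat) : List Int × Int :=
  let val := 10 * s.1.getD j 0 + s.2
  (s.1.set j (PySem.Int.floordiv val d), PySem.Int.mod val d)

-- 'while carry_over > 0: pi_digits.insert(0, carry_over % 10); carry_over //= 10'
def carryLoop (carry : Int) (digits : List Int) : List Int :=
  if 0 < carry then
    carryLoop (PySem.Int.floordiv carry 10) (PySem.Int.mod carry 10 :: digits)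
  else digits
termination_by carry.toNat
decreasing_by
  rw [PySem.Int.floordiv_eq_ediv_of_pos (by omega)]
  omega

-- one iteration of 'for i in range(1, n+1)'
def outerStep (digits : List Int) (i : Int) : List Int :=
  let s := ((List.range digits.length).reverse).foldl (innerStep (2 * i - 1)) (digits, 0)
  carryLoop s.2 s.1

def calc_spigot (n : Int) : Int :=
  let ds := (PySem.List.pyRange 1 (n + 1) 1).foldl outerStep [2]
  -- ds is never empty (proved below), so pyGet? ds (-1) is always some; getD 0 never defaults
  (PySem.List.pyGet? ds (-1)).getD 0

-- ===== PORT B =====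
def calc_spigot_alt (n : Int) : Int :=
  (PySem.List.pyRange 1 (n + 1) 1).foldl (fun x i => PySem.Int.floordiv (10 * x) (2 * i - 1)) 2

-- ===== PRECONDITION & SPEC =====
def Spec_calc_spigot (n : Int) (out : Int) : Prop := out = calc_spigot_alt n
instance (n : Int) (out : Int) : Decidable (Spec_calc_spigot n out) := by unfold Spec_calc_spigot; infer_instance

-- ===== CLAIM (what is proved, stated in full; the proofs are below) =====
def Claim_equal_calc_spigot : Prop := ∀ (n : Int), Dom_calc_spigot n → Spec_calc_spigot n (calc_spigot n)

-- ===== LEMMAS AND PROOFS =====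

-- the inner sweep never changes the length
theorem innerFold_length (d : Int) (js : List Nat) :
    ∀ (ds : List Int) (c : Int), ((js.foldl (innerStep d) (ds, c)).1).length = ds.length := by
  induction js with
  | nil => intro ds c; rfl
  | cons j js ih =>
      intro ds c
      simp only [List.foldl_cons, innerStep]
      rw [ih]
      simp

-- steps at indices below length-1 do not touch the last element
theorem innerFold_getLast? (d : Int) (js : List Nat) :
    ∀ (ds : List Int) (c : Int), (∀ j ∈ js, j + 1 < ds.length) →
      ((js.foldl (innerStep d) (ds, c)).1).getLast? = ds.getLast? := by
  induction js with
  | nil => intro ds c _; rfl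
  | cons j js ih =>
      intro ds c h
      simp only [List.foldl_cons, innerStep]
      rw [ih]
      · rw [List.getLast?_eq_getElem?, List.getLast?_eq_getElem?, List.length_set,
          List.getElem?_set_ne (by have := h j (by simp); omega)]
      · intro k hk
        rw [List.length_set]
        exact h k (by simp [hk])

-- the full reversed sweep maps the last element to (10*x) // d
theorem innerSweep_getLast? (d : Int) (ds : List Int) (x : Int) (hx : ds.getLast? = some x) :
    (((List.range ds.length).reverse).foldl (innerStep d) (ds, 0)).1.getLast?
      = some (PySem.Int.floordiv (10 * x) d) := by
  have hne : ds ≠ [] := by intro h; simp [h] at hx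
  obtain ⟨m, hm⟩ : ∃ m, ds.length = m + 1 :=
    ⟨ds.length - 1, by have := List.length_pos_iff.mpr hne; omega⟩
  rw [hm, List.range_succ, List.reverse_append]
  simp only [List.reverse_singleton, List.singleton_append, List.foldl_cons]
  have hgm : ds.getD m 0 = x := by
    have h1 : ds[m]? = some x := by
      rw [show m = ds.length - 1 by omega, ← List.getLast?_eq_getElem?, hx]
    simp [List.getD_eq_getElem?_getD, h1]
  rw [innerFold_getLast?]
  · simp only [innerStep, hgm, add_zero]
    rw [List.getLast?_eq_getElem?, List.length_set, hm, Nat.add_sub_cancel,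
      List.getElem?_set_self (by omega)]
  · intro k hk
    simp only [innerStep, List.length_set, hm]
    have : k < m := by
      have := List.mem_reverse.mp hk
      exact List.mem_range.mp this
    omega

-- the carry insertions at the front keep the list nonempty and its last element
theorem carryLoop_getLast? (c : Int) (ds : List Int) (h : ds ≠ []) :
    (carryLoop c ds).getLast? = ds.getLast? ∧ carryLoop c ds ≠ [] := by
  induction c, ds using carryLoop.induct with
  | case1 c ds hc ih =>
      rw [carryLoop, if_pos hc]
      obtain ⟨h1, h2⟩ := ih (by simp)
      refine ⟨?_, h2⟩
      rw [h1]
      cases ds with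
      | nil => exact absurd rfl h
      | cons b bs => simp [List.getLast?_cons_cons]
  | case2 c ds hc =>
      rw [carryLoop, if_neg hc]
      exact ⟨rfl, h⟩

-- main invariant: the fold on lists tracks B's fold on the last element
theorem outer_invariant (is : List Int) :
    ∀ (ds : List Int) (x : Int), ds.getLast? = some x →
      (is.foldl outerStep ds).getLast?
        = some (is.foldl (fun x i => PySem.Int.floordiv (10 * x) (2 * i - 1)) x) := by
  induction is with
  | nil => intro ds x hx; simpa using hx
  | cons i is ih =>
      intro ds x hx
      have hne : ds ≠ [] := by intro h; simp [h] at hx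
      simp only [List.foldl_cons]
      apply ih
      unfold outerStep
      have hlen : (((List.range ds.length).reverse).foldl (innerStep (2 * i - 1)) (ds, 0)).1.length
          = ds.length := innerFold_length _ _ ds 0
      have hlast := innerSweep_getLast? (2 * i - 1) ds x hx
      have hne2 : (((List.range ds.length).reverse).foldl (innerStep (2 * i - 1)) (ds, 0)).1 ≠ [] := by
        intro h
        rw [h] at hlen
        exact hne (List.length_eq_zero_iff.mp hlen.symm)
      rw [(carryLoop_getLast? _ _ hne2).1, hlast]

-- ===== VERDICT (by name: the statement is the Claim_ definition above) =====
theorem calc_spigot_spec : Claim_equal_calc_spigot := by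
  intro n _
  unfold Spec_calc_spigot calc_spigot calc_spigot_alt
  have h := outer_invariant (PySem.List.pyRange 1 (n + 1) 1) [2] 2 rfl
  simp only [PySem.List.pyGet?_neg_one, h, Option.getD_some]
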